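-- pv_equiv track=rewrite | github.com/Zuzaarbuza/Python-course-SI | lab2.py | threshold_bubble
-- ===== SOURCE A (Python) =====
-- def threshold_bubble(lista, prog):
--     greater3 = []
--     i = 0
--     while len(greater3) < 3:
--         if lista[i] > prog:
--             greater3.append(i)
--         i += 1
--
--
--     for i in range(0, len(greater3)):
--         for j in range(len(greater3)-1):
--             if lista[greater3[j]]<lista[greater3[j+1]]:
--                 t = greater3[j]
--                 greater3[j] = greater3[j+1]
--                 greater3[j+1] = t
--     return greater3
-- ===== SOURCE B (Python) =====
-- def threshold_bubble(lista, prog):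
--     hits = (i for i, x in enumerate(lista) if x > prog)
--     greater3 = [next(hits), next(hits), next(hits)]
--     return sorted(greater3, key=lambda k: lista[k], reverse=True)
-- ===== Notes on version B (the rewrite author's own statement) =====
-- stated objective: idiomatic
-- what changed: The unbounded while-loop with manual indexing becomes a lazy enumerate generator from which the three required indices are drawn with next(), and the hand-written O(k^2) adjacent-swap bubble sort is replaced by one stable sorted(..., reverse=True) call keyed by the list value.
import Mathlib
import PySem

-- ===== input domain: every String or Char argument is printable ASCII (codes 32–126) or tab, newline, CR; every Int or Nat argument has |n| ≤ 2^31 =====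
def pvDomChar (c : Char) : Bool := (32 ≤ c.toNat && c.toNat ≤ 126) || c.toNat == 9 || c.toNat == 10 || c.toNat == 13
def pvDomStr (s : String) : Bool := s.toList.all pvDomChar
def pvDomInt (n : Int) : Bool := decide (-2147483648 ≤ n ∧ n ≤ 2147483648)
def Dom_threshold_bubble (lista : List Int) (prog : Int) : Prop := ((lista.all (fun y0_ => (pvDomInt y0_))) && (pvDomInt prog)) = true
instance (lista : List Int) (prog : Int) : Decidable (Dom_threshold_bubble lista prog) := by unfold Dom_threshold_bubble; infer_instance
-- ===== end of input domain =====

-- B replaces A's unbounded while-loop by an enumerate comprehension truncated to three hits and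
-- the hand-written bubble sort by one stable sorted(..., reverse=True) call (idiomatic; equal speed).

-- ===== PORT A =====
-- the while-loop: walks lista from index i, appending indices of elements > prog until three are
-- collected; when lista is exhausted first, Python raises IndexError (excluded by Pre_) — here we
-- return the partial accumulator, which the claim never relies on.
def pvCollect (xs : List Int) (prog : Int) (i : Int) (acc : List Int) : List Int :=
  if acc.length < 3 then
    match xs with
    | [] => acc
    | x :: rest => pvCollect rest prog (i + 1) (if x > prog then acc ++ [i] else acc)
  else acc

-- one inner j-pass of the bubble sort (adjacent swap when lista[g[j]] < lista[g[j+1]]);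
-- lista[·] is ported as pyGetD with default 0: every collected index is in range, so exact.
def pvPass (lista : List Int) : List Int → List Int
  | a :: b :: rest =>
      if PySem.List.pyGetD lista a 0 < PySem.List.pyGetD lista b 0 then
        b :: pvPass lista (a :: rest)
      else
        a :: pvPass lista (b :: rest)
  | l => l

def threshold_bubble (lista : List Int) (prog : Int) : List Int :=
  let greater3 := pvCollect lista prog 0 []
  (PySem.List.pyRange 0 (greater3.length : Int) 1).foldl (fun g _ => pvPass lista g) greater3

-- ===== PORT B =====
-- Source B draws the first three qualifying indices from a lazy enumerate generator with next();
-- here: take 3 of the filtered enumeration (when fewer exist Python raises StopIteration —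
-- outside Pre_ — and the port returns the partial list), then Python's stable reverse sort.
def threshold_bubble_alt (lista : List Int) (prog : Int) : List Int :=
  let greater3 := (((PySem.List.enumerate lista).filter (fun p => decide (p.2 > prog))).map Prod.fst).take 3
  PySem.List.sorted greater3 (fun k => PySem.List.pyGetD lista k 0) true

-- ===== PRECONDITION & SPEC =====
-- Pre_ excludes exactly the inputs on which A raises IndexError: fewer than three elements > prog.
def Pre_threshold_bubble (lista : List Int) (prog : Int) : Prop :=
  3 ≤ (lista.filter (fun x => decide (x > prog))).length
instance (lista : List Int) (prog : Int) : Decidable (Pre_threshold_bubble lista prog) := by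
  unfold Pre_threshold_bubble; infer_instance

def pvWitness_threshold_bubble : List Int × Int := ([5, 1, 7, 6, 0], 2)

def Spec_threshold_bubble (lista : List Int) (prog : Int) (out : List Int) : Prop :=
  out = threshold_bubble_alt lista prog
instance (lista : List Int) (prog : Int) (out : List Int) : Decidable (Spec_threshold_bubble lista prog out) := by
  unfold Spec_threshold_bubble; infer_instance

-- ===== CLAIM (what is proved, stated in full; the proofs are below) =====
def Claim_equal_threshold_bubble : Prop := ∀ (lista : List Int) (prog : Int), Dom_threshold_bubble lista prog → Pre_threshold_bubble lista prog → Spec_threshold_bubble lista prog (threshold_bubble lista prog)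

-- ===== LEMMAS AND PROOFS =====

-- the list of indices (counting from i) of elements of xs that exceed prog
def pvIdxs (xs : List Int) (prog : Int) (i : Int) : List Int :=
  match xs with
  | [] => []
  | x :: rest => if x > prog then i :: pvIdxs rest prog (i + 1) else pvIdxs rest prog (i + 1)

lemma pvCollect_eq (xs : List Int) (prog : Int) :
    ∀ (i : Int) (acc : List Int), acc.length ≤ 3 →
      pvCollect xs prog i acc = acc ++ (pvIdxs xs prog i).take (3 - acc.length) := by
  induction xs with
  | nil =>
    intro i acc _
    simp only [pvCollect, pvIdxs, List.take_nil, List.append_nil]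
    split <;> rfl
  | cons x rest ih =>
    intro i acc hle
    by_cases h3 : acc.length < 3
    · simp only [pvCollect, if_pos h3, pvIdxs]
      by_cases hx : x > prog
      · rw [if_pos hx, if_pos hx, ih (i + 1) (acc ++ [i]) (by simp; omega)]
        simp only [List.length_append, List.length_cons, List.length_nil]
        have : 3 - acc.length = (3 - (acc.length + 1)) + 1 := by omega
        rw [this, List.take_succ_cons, List.append_assoc]
        simp
      · rw [if_neg hx, if_neg hx, ih (i + 1) acc hle]
    · have : acc.length = 3 := by omega
      simp [pvCollect, this]

lemma pvIdxs_eq_filter_enumerate (xs : List Int) (prog : Int) :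
    ∀ (i : Int),
      (((PySem.List.enumerate xs i).filter (fun p => decide (p.2 > prog))).map Prod.fst)
        = pvIdxs xs prog i := by
  induction xs with
  | nil => intro i; simp [PySem.List.enumerate_nil, pvIdxs]
  | cons x rest ih =>
    intro i
    rw [PySem.List.enumerate_cons]
    by_cases hx : x > prog
    · simp [hx, pvIdxs, ih (i + 1)]
    · simp [hx, pvIdxs, ih (i + 1)]

-- the bubble sort on at most three elements agrees with Python's stable reverse sort
lemma pvBubble_eq_sorted (lista : List Int) (g : List Int) (hg : g.length ≤ 3) :
    (PySem.List.pyRange 0 (g.length : Int) 1).foldl (fun g' _ => pvPass lista g') g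
      = PySem.List.sorted g (fun k => PySem.List.pyGetD lista k 0) true := by
  rw [PySem.List.sorted_rev_eq_foldl_insertBy]
  rcases g with _ | ⟨a, _ | ⟨b, _ | ⟨c, _ | ⟨d, t⟩⟩⟩⟩
  · simp
  · have hl : (([a] : List Int).length : Int) = 1 := by simp
    rw [hl, (by decide : PySem.List.pyRange 0 1 1 = [0])]
    simp [pvPass, PySem.List.insertBy, List.foldl]
  · have hl : (([a, b] : List Int).length : Int) = 2 := by simp
    rw [hl, (by decide : PySem.List.pyRange 0 2 1 = [0, 1])]
    by_cases h : PySem.List.pyGetD lista a 0 < PySem.List.pyGetD lista b 0 <;>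
      simp_all [pvPass, PySem.List.insertBy, List.foldl] <;>
      (repeat' first
        | rfl
        | (exfalso; omega)
        | (intro _; exfalso; omega)
        | (split_ifs <;> simp_all [pvPass, PySem.List.insertBy]))
  · have hl : (([a, b, c] : List Int).length : Int) = 3 := by simp
    rw [hl, (by decide : PySem.List.pyRange 0 3 1 = [0, 1, 2])]
    by_cases h1 : PySem.List.pyGetD lista a 0 < PySem.List.pyGetD lista b 0 <;>
    by_cases h2 : PySem.List.pyGetD lista b 0 < PySem.List.pyGetD lista c 0 <;>
    by_cases h3 : PySem.List.pyGetD lista a 0 < PySem.List.pyGetD lista c 0 <;>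
      simp_all [pvPass, PySem.List.insertBy, List.foldl] <;>
      (repeat' first
        | rfl
        | (exfalso; omega)
        | (intro _; exfalso; omega)
        | (split_ifs <;> simp_all [pvPass, PySem.List.insertBy]))
  · simp at hg; omega

theorem threshold_bubble_spec : Claim_equal_threshold_bubble := by
  intro lista prog _ _
  unfold Spec_threshold_bubble threshold_bubble threshold_bubble_alt
  have hc : pvCollect lista prog 0 [] = (pvIdxs lista prog 0).take 3 := by
    rw [pvCollect_eq lista prog 0 [] (by simp)]; simp
  rw [hc, pvIdxs_eq_filter_enumerate lista prog 0]
  exact pvBubble_eq_sorted lista ((pvIdxs lista prog 0).take 3) (List.length_take_le ..)
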